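-- pv_equiv track=rewrite | github.com/pnw-aaron/Advent2019 | Day04/day04_secure_container.py | match_adjacent_not_group
-- ===== SOURCE A (Python) =====
-- def match_adjacent_not_group(num_str: str) -> bool:
--     match = False
--     in_group = False
--
--     for i in range(1, len(num_str)):
--         if num_str[i] == num_str[i - 1]:
--             if match or in_group:
--                 in_group = True
--                 match = False
--             else:
--                 match = True
--         else:
--             if match:
--                 return True
--             in_group = False
--
--     return match
-- ===== SOURCE B (Python) =====
-- def match_adjacent_not_group(num_str: str) -> bool:
--     # Group the string into runs of equal characters (run-length encoding),
--     # then test whether any run has length exactly 2.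
--     lengths = []
--     cur = None
--     n = 0
--     for ch in num_str:
--         if ch == cur:
--             n += 1
--         else:
--             if cur is not None:
--                 lengths.append(n)
--             cur, n = ch, 1
--     if cur is not None:
--         lengths.append(n)
--     return any(k == 2 for k in lengths)
-- ===== Notes on version B (the rewrite author's own statement) =====
-- stated objective: idiomatic
-- what changed: B run-length-encodes the string into run lengths and checks whether any run length equals 2, instead of A's two-boolean flag state machine with an early return.
import Mathlib
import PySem

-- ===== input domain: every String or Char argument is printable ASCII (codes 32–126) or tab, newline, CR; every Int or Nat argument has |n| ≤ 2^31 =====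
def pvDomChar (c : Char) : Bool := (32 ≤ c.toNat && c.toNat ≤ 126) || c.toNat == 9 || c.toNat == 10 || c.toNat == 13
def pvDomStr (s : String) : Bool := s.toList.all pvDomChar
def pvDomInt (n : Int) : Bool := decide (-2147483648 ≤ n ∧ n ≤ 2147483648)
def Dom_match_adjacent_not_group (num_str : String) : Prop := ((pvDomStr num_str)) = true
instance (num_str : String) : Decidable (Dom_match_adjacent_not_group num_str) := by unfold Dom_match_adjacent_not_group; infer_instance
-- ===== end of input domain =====

-- ===== PORT A =====
-- A's loop: early return modelled by the first branch returning true; state (match, in_group).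
def loopA (prev : Char) (mtch in_group : Bool) : List Char → Bool
  | [] => mtch
  | c :: rest =>
    if c == prev then
      if mtch || in_group then loopA c false true rest
      else loopA c true in_group rest
    else
      if mtch then true
      else loopA c false false rest

def match_adjacent_not_group (num_str : String) : Bool :=
  match num_str.toList with
  | [] => false
  | c :: rest => loopA c false false rest

-- ===== PORT B =====
-- B: run-length encode (current char c, current count n), then any run length == 2.
def runLens (c : Char) (n : Nat) : List Char → List Nat
  | [] => [n]
  | d :: rest => if d == c then runLens c (n + 1) rest else n :: runLens d 1 rest

def match_adjacent_not_group_alt (num_str : String) : Bool :=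
  match num_str.toList with
  | [] => false
  | c :: rest => (runLens c 1 rest).any (fun k => k == 2)

-- ===== PRECONDITION & SPEC =====
def Spec_match_adjacent_not_group (num_str : String) (out : Bool) : Prop := out = match_adjacent_not_group_alt num_str
instance (num_str : String) (out : Bool) : Decidable (Spec_match_adjacent_not_group num_str out) := by unfold Spec_match_adjacent_not_group; infer_instance

-- ===== CLAIM (what is proved, stated in full; the proofs are below) =====
def Claim_equal_match_adjacent_not_group : Prop := ∀ (num_str : String), Dom_match_adjacent_not_group num_str → Spec_match_adjacent_not_group num_str (match_adjacent_not_group num_str)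

-- ===== LEMMAS AND PROOFS =====

-- ===== VERDICT (by name: the statement is the Claim_ definition above) =====
-- Invariant: A's flags encode the current run length n (mtch ↔ n = 2, in_group ↔ n ≥ 3).
theorem loopA_eq_runLens (rest : List Char) : ∀ (c : Char) (n : Nat), 1 ≤ n →
    loopA c (decide (n = 2)) (decide (3 ≤ n)) rest = (runLens c n rest).any (fun k => k == 2) := by
  induction rest with
  | nil =>
    intro c n _
    simp only [loopA, runLens, List.any_cons, List.any_nil, Bool.or_false]
    cases h : n == 2 <;> simp_all
  | cons d rest ih =>
    intro c n hn
    by_cases hdc : d = c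
    · subst hdc
      simp only [loopA, runLens, beq_self_eq_true, if_true]
      by_cases h2 : 2 ≤ n
      · have : (decide (n = 2) || decide (3 ≤ n)) = true := by
          rcases Nat.lt_or_ge n 3 with h | h
          · have : n = 2 := by omega
            simp [this]
          · simp [h]
        rw [this, if_pos rfl]
        have := ih d (n + 1) (by omega)
        have h1 : decide (n + 1 = 2) = false := by simp; omega
        have h3 : decide (3 ≤ n + 1) = true := by simp; omega
        rw [h1, h3] at this
        exact this
      · have hn1 : n = 1 := by omega
        subst hn1
        have := ih d 2 (by omega)
        norm_num at this ⊢
        exact this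
    · have hbeq : (d == c) = false := by simp [hdc]
      simp only [loopA, runLens, hbeq]
      by_cases h2 : n = 2
      · subst h2
        simp [List.any_cons]
      · have h2' : decide (n = 2) = false := by simp [h2]
        rw [h2', if_neg (by simp)]
        have := ih d 1 (by omega)
        norm_num at this
        rw [this]
        simp [List.any_cons, h2]

theorem match_adjacent_not_group_spec : Claim_equal_match_adjacent_not_group := by
  intro s _
  unfold Spec_match_adjacent_not_group match_adjacent_not_group match_adjacent_not_group_alt
  cases s.toList with
  | nil => rfl
  | cons c rest =>
    have := loopA_eq_runLens rest c 1 (by omega)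
    norm_num at this
    exact this
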